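-- pv_equiv track=rewrite | github.com/anilkunwar/knowledgegraphLiB | bibliometric_informatics/compute-termsignificanceanddisplay.py | get_data_type
-- ===== SOURCE A (Python) =====
-- IDF_APPROX_TERMS = [
--     "study", "analysis", "results", "method", "experiment",
--     "electrolyte", "anode", "cathode", "dendrite", "phase field",
--     "lithium-ion battery", "solid electrolyte interphase", "electrode",
--     "charge-discharge", "capacity fading", "electrochemical modeling",
--     "lithium plating", "phase field method", "dendrite growth",
--     "ionic conductivity", "battery degradation", "solid-state battery",
--     "electrolyte decomposition", "interface stability", "lithium diffusion"
-- ]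
--
-- KEYWORD_CATEGORIES = {
--     "Materials": [
--         "lithium", "electrolyte", "anode", "cathode", "separator",
--         "solid electrolyte", "liquid electrolyte", "polymer electrolyte",
--         "lithium cobalt oxide", "lithium iron phosphate", "graphite anode",
--         "silicon anode", "lithium metal", "solid-state electrolyte",
--         "lithium titanate", "nickel manganese cobalt", "lithium sulfur",
--         "garnet electrolyte", "sulfide electrolyte", "oxide electrolyte",
--         "lithium-ion battery", "solid electrolyte interphase", "sei layer"
--     ],
--     "Methods": [
--         "phase field method", "electrochemical modeling", "molecular dynamics",
--         "density functional theory", "finite element analysis", "spectroscopy",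
--         "impedance spectroscopy", "cyclic voltammetry", "galvanostatic cycling",
--         "operando imaging", "x-ray diffraction", "scanning electron microscopy",
--         "transmission electron microscopy", "electrochemical impedance",
--         "in-situ characterization", "computational modeling", "continuum modeling",
--         "phase field simulation", "lattice boltzmann method", "monte carlo simulation"
--     ],
--     "Physical Phenomena": [
--         "dendrite growth", "lithium plating", "electrolyte decomposition",
--         "interface stability", "lithium diffusion", "ionic conductivity",
--         "charge transfer", "electrode polarization", "sei formation",
--         "thermal runaway", "electrochemical reaction", "ion transport",
--         "concentration gradient", "overpotential", "capacity fading",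
--         "battery degradation", "side reaction", "electrode cracking",
--         "lithium dendrite", "electrolyte oxidation"
--     ],
--     "Properties": [
--         "capacity", "energy density", "power density", "cycle life",
--         "ionic conductivity", "electronic conductivity", "thermal stability",
--         "mechanical stability", "electrochemical stability", "specific capacity",
--         "coulombic efficiency", "voltage hysteresis", "rate capability",
--         "capacity retention", "mechanical stress", "interface resistance",
--         "electrolyte conductivity", "diffusion coefficient", "charge-discharge rate",
--         "sei thickness"
--     ],
--     "Other": [
--         "battery safety", "fast charging", "high-energy battery",
--         "electrode design", "electrolyte optimization", "battery management",
--         "sustainable battery", "recyclable battery", "solid-state battery",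
--         "phase field modeling", "dendrite suppression", "electrode-electrolyte interface",
--         "battery performance", "thermal management", "electrochemical kinetics"
--     ]
-- }
--
-- def get_data_type(term):
--     data_types = []
--     if term in IDF_APPROX_TERMS:
--         data_types.append("Core Term")
--     for category, terms_list in KEYWORD_CATEGORIES.items():
--         if term in terms_list:
--             data_types.append(category)
--     return ", ".join(data_types) if data_types else "Unknown"
-- ===== SOURCE B (Python) =====
-- # Precomputed flat lookup table: each known term maps directly to its final
-- # label string; the function is a single dict lookup with default "Unknown".
-- _LABELS = {
--     'study': 'Core Term',
--     'analysis': 'Core Term',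
--     'results': 'Core Term',
--     'method': 'Core Term',
--     'experiment': 'Core Term',
--     'electrolyte': 'Core Term, Materials',
--     'anode': 'Core Term, Materials',
--     'cathode': 'Core Term, Materials',
--     'dendrite': 'Core Term',
--     'phase field': 'Core Term',
--     'lithium-ion battery': 'Core Term, Materials',
--     'solid electrolyte interphase': 'Core Term, Materials',
--     'electrode': 'Core Term',
--     'charge-discharge': 'Core Term',
--     'capacity fading': 'Core Term, Physical Phenomena',
--     'electrochemical modeling': 'Core Term, Methods',
--     'lithium plating': 'Core Term, Physical Phenomena',
--     'phase field method': 'Core Term, Methods',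
--     'dendrite growth': 'Core Term, Physical Phenomena',
--     'ionic conductivity': 'Core Term, Physical Phenomena, Properties',
--     'battery degradation': 'Core Term, Physical Phenomena',
--     'solid-state battery': 'Core Term, Other',
--     'electrolyte decomposition': 'Core Term, Physical Phenomena',
--     'interface stability': 'Core Term, Physical Phenomena',
--     'lithium diffusion': 'Core Term, Physical Phenomena',
--     'lithium': 'Materials',
--     'separator': 'Materials',
--     'solid electrolyte': 'Materials',
--     'liquid electrolyte': 'Materials',
--     'polymer electrolyte': 'Materials',
--     'lithium cobalt oxide': 'Materials',
--     'lithium iron phosphate': 'Materials',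
--     'graphite anode': 'Materials',
--     'silicon anode': 'Materials',
--     'lithium metal': 'Materials',
--     'solid-state electrolyte': 'Materials',
--     'lithium titanate': 'Materials',
--     'nickel manganese cobalt': 'Materials',
--     'lithium sulfur': 'Materials',
--     'garnet electrolyte': 'Materials',
--     'sulfide electrolyte': 'Materials',
--     'oxide electrolyte': 'Materials',
--     'sei layer': 'Materials',
--     'molecular dynamics': 'Methods',
--     'density functional theory': 'Methods',
--     'finite element analysis': 'Methods',
--     'spectroscopy': 'Methods',
--     'impedance spectroscopy': 'Methods',
--     'cyclic voltammetry': 'Methods',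
--     'galvanostatic cycling': 'Methods',
--     'operando imaging': 'Methods',
--     'x-ray diffraction': 'Methods',
--     'scanning electron microscopy': 'Methods',
--     'transmission electron microscopy': 'Methods',
--     'electrochemical impedance': 'Methods',
--     'in-situ characterization': 'Methods',
--     'computational modeling': 'Methods',
--     'continuum modeling': 'Methods',
--     'phase field simulation': 'Methods',
--     'lattice boltzmann method': 'Methods',
--     'monte carlo simulation': 'Methods',
--     'charge transfer': 'Physical Phenomena',
--     'electrode polarization': 'Physical Phenomena',
--     'sei formation': 'Physical Phenomena',
--     'thermal runaway': 'Physical Phenomena',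
--     'electrochemical reaction': 'Physical Phenomena',
--     'ion transport': 'Physical Phenomena',
--     'concentration gradient': 'Physical Phenomena',
--     'overpotential': 'Physical Phenomena',
--     'side reaction': 'Physical Phenomena',
--     'electrode cracking': 'Physical Phenomena',
--     'lithium dendrite': 'Physical Phenomena',
--     'electrolyte oxidation': 'Physical Phenomena',
--     'capacity': 'Properties',
--     'energy density': 'Properties',
--     'power density': 'Properties',
--     'cycle life': 'Properties',
--     'electronic conductivity': 'Properties',
--     'thermal stability': 'Properties',
--     'mechanical stability': 'Properties',
--     'electrochemical stability': 'Properties',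
--     'specific capacity': 'Properties',
--     'coulombic efficiency': 'Properties',
--     'voltage hysteresis': 'Properties',
--     'rate capability': 'Properties',
--     'capacity retention': 'Properties',
--     'mechanical stress': 'Properties',
--     'interface resistance': 'Properties',
--     'electrolyte conductivity': 'Properties',
--     'diffusion coefficient': 'Properties',
--     'charge-discharge rate': 'Properties',
--     'sei thickness': 'Properties',
--     'battery safety': 'Other',
--     'fast charging': 'Other',
--     'high-energy battery': 'Other',
--     'electrode design': 'Other',
--     'electrolyte optimization': 'Other',
--     'battery management': 'Other',
--     'sustainable battery': 'Other',
--     'recyclable battery': 'Other',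
--     'phase field modeling': 'Other',
--     'dendrite suppression': 'Other',
--     'electrode-electrolyte interface': 'Other',
--     'battery performance': 'Other',
--     'thermal management': 'Other',
--     'electrochemical kinetics': 'Other',
-- }
--
-- def get_data_type(term):
--     return _LABELS.get(term, "Unknown")
-- ===== Notes on version B (the rewrite author's own statement) =====
-- stated objective: idiomatic
-- what changed: Replaced A's per-call scan of IDF_APPROX_TERMS and every KEYWORD_CATEGORIES list by a precomputed flat lookup table mapping each known term directly to its final joined label string, so the function body is a single dict .get with default 'Unknown'.
import Mathlib
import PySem

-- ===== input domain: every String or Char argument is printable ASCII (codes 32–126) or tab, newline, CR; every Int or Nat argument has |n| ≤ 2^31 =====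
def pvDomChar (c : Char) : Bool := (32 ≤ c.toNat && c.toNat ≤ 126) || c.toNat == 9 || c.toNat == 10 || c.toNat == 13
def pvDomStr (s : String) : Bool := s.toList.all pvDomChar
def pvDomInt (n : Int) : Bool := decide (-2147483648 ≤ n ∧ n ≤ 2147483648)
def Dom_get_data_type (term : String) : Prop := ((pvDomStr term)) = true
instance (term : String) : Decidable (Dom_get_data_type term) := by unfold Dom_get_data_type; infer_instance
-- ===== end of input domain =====

-- B replaces A's per-call scans by a precomputed term -> full-label-string lookup table (idiomatic).

-- ===== PORT A =====
def IDF_APPROX_TERMS : List String := [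
    "study", "analysis", "results", "method", "experiment",
    "electrolyte", "anode", "cathode", "dendrite", "phase field",
    "lithium-ion battery", "solid electrolyte interphase", "electrode",
    "charge-discharge", "capacity fading", "electrochemical modeling",
    "lithium plating", "phase field method", "dendrite growth",
    "ionic conductivity", "battery degradation", "solid-state battery",
    "electrolyte decomposition", "interface stability", "lithium diffusion"]

def CAT_Materials : List String := [
    "lithium", "electrolyte", "anode", "cathode", "separator",
    "solid electrolyte", "liquid electrolyte", "polymer electrolyte",
    "lithium cobalt oxide", "lithium iron phosphate", "graphite anode",
    "silicon anode", "lithium metal", "solid-state electrolyte",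
    "lithium titanate", "nickel manganese cobalt", "lithium sulfur",
    "garnet electrolyte", "sulfide electrolyte", "oxide electrolyte",
    "lithium-ion battery", "solid electrolyte interphase", "sei layer"]

def CAT_Methods : List String := [
    "phase field method", "electrochemical modeling", "molecular dynamics",
    "density functional theory", "finite element analysis", "spectroscopy",
    "impedance spectroscopy", "cyclic voltammetry", "galvanostatic cycling",
    "operando imaging", "x-ray diffraction", "scanning electron microscopy",
    "transmission electron microscopy", "electrochemical impedance",
    "in-situ characterization", "computational modeling", "continuum modeling",
    "phase field simulation", "lattice boltzmann method", "monte carlo simulation"]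

def CAT_Phenomena : List String := [
    "dendrite growth", "lithium plating", "electrolyte decomposition",
    "interface stability", "lithium diffusion", "ionic conductivity",
    "charge transfer", "electrode polarization", "sei formation",
    "thermal runaway", "electrochemical reaction", "ion transport",
    "concentration gradient", "overpotential", "capacity fading",
    "battery degradation", "side reaction", "electrode cracking",
    "lithium dendrite", "electrolyte oxidation"]

def CAT_Properties : List String := [
    "capacity", "energy density", "power density", "cycle life",
    "ionic conductivity", "electronic conductivity", "thermal stability",
    "mechanical stability", "electrochemical stability", "specific capacity",
    "coulombic efficiency", "voltage hysteresis", "rate capability",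
    "capacity retention", "mechanical stress", "interface resistance",
    "electrolyte conductivity", "diffusion coefficient", "charge-discharge rate",
    "sei thickness"]

def CAT_Other : List String := [
    "battery safety", "fast charging", "high-energy battery",
    "electrode design", "electrolyte optimization", "battery management",
    "sustainable battery", "recyclable battery", "solid-state battery",
    "phase field modeling", "dendrite suppression", "electrode-electrolyte interface",
    "battery performance", "thermal management", "electrochemical kinetics"]

def KEYWORD_CATEGORIES : PySem.Dict String (List String) :=
  PySem.Dict.ofList [("Materials", CAT_Materials), ("Methods", CAT_Methods),
    ("Physical Phenomena", CAT_Phenomena), ("Properties", CAT_Properties),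
    ("Other", CAT_Other)]

def get_data_type (term : String) : String :=
  let data_types : List String :=
    if IDF_APPROX_TERMS.contains term then ["Core Term"] else []
  let data_types :=
    KEYWORD_CATEGORIES.items.foldl
      (fun acc p => if p.2.contains term then acc ++ [p.1] else acc) data_types
  if data_types.isEmpty then "Unknown" else PySem.Str.join ", " data_types

-- ===== PORT B =====
-- B is a precomputed flat lookup table: each known term maps directly to its
-- final label string; the function is a single lookup with default "Unknown".
def LABELS : PySem.Dict String String := PySem.Dict.ofList [
  ("study", "Core Term"),
  ("analysis", "Core Term"),
  ("results", "Core Term"),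
  ("method", "Core Term"),
  ("experiment", "Core Term"),
  ("electrolyte", "Core Term, Materials"),
  ("anode", "Core Term, Materials"),
  ("cathode", "Core Term, Materials"),
  ("dendrite", "Core Term"),
  ("phase field", "Core Term"),
  ("lithium-ion battery", "Core Term, Materials"),
  ("solid electrolyte interphase", "Core Term, Materials"),
  ("electrode", "Core Term"),
  ("charge-discharge", "Core Term"),
  ("capacity fading", "Core Term, Physical Phenomena"),
  ("electrochemical modeling", "Core Term, Methods"),
  ("lithium plating", "Core Term, Physical Phenomena"),
  ("phase field method", "Core Term, Methods"),
  ("dendrite growth", "Core Term, Physical Phenomena"),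
  ("ionic conductivity", "Core Term, Physical Phenomena, Properties"),
  ("battery degradation", "Core Term, Physical Phenomena"),
  ("solid-state battery", "Core Term, Other"),
  ("electrolyte decomposition", "Core Term, Physical Phenomena"),
  ("interface stability", "Core Term, Physical Phenomena"),
  ("lithium diffusion", "Core Term, Physical Phenomena"),
  ("lithium", "Materials"),
  ("separator", "Materials"),
  ("solid electrolyte", "Materials"),
  ("liquid electrolyte", "Materials"),
  ("polymer electrolyte", "Materials"),
  ("lithium cobalt oxide", "Materials"),
  ("lithium iron phosphate", "Materials"),
  ("graphite anode", "Materials"),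
  ("silicon anode", "Materials"),
  ("lithium metal", "Materials"),
  ("solid-state electrolyte", "Materials"),
  ("lithium titanate", "Materials"),
  ("nickel manganese cobalt", "Materials"),
  ("lithium sulfur", "Materials"),
  ("garnet electrolyte", "Materials"),
  ("sulfide electrolyte", "Materials"),
  ("oxide electrolyte", "Materials"),
  ("sei layer", "Materials"),
  ("molecular dynamics", "Methods"),
  ("density functional theory", "Methods"),
  ("finite element analysis", "Methods"),
  ("spectroscopy", "Methods"),
  ("impedance spectroscopy", "Methods"),
  ("cyclic voltammetry", "Methods"),
  ("galvanostatic cycling", "Methods"),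
  ("operando imaging", "Methods"),
  ("x-ray diffraction", "Methods"),
  ("scanning electron microscopy", "Methods"),
  ("transmission electron microscopy", "Methods"),
  ("electrochemical impedance", "Methods"),
  ("in-situ characterization", "Methods"),
  ("computational modeling", "Methods"),
  ("continuum modeling", "Methods"),
  ("phase field simulation", "Methods"),
  ("lattice boltzmann method", "Methods"),
  ("monte carlo simulation", "Methods"),
  ("charge transfer", "Physical Phenomena"),
  ("electrode polarization", "Physical Phenomena"),
  ("sei formation", "Physical Phenomena"),
  ("thermal runaway", "Physical Phenomena"),
  ("electrochemical reaction", "Physical Phenomena"),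
  ("ion transport", "Physical Phenomena"),
  ("concentration gradient", "Physical Phenomena"),
  ("overpotential", "Physical Phenomena"),
  ("side reaction", "Physical Phenomena"),
  ("electrode cracking", "Physical Phenomena"),
  ("lithium dendrite", "Physical Phenomena"),
  ("electrolyte oxidation", "Physical Phenomena"),
  ("capacity", "Properties"),
  ("energy density", "Properties"),
  ("power density", "Properties"),
  ("cycle life", "Properties"),
  ("electronic conductivity", "Properties"),
  ("thermal stability", "Properties"),
  ("mechanical stability", "Properties"),
  ("electrochemical stability", "Properties"),
  ("specific capacity", "Properties"),
  ("coulombic efficiency", "Properties"),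
  ("voltage hysteresis", "Properties"),
  ("rate capability", "Properties"),
  ("capacity retention", "Properties"),
  ("mechanical stress", "Properties"),
  ("interface resistance", "Properties"),
  ("electrolyte conductivity", "Properties"),
  ("diffusion coefficient", "Properties"),
  ("charge-discharge rate", "Properties"),
  ("sei thickness", "Properties"),
  ("battery safety", "Other"),
  ("fast charging", "Other"),
  ("high-energy battery", "Other"),
  ("electrode design", "Other"),
  ("electrolyte optimization", "Other"),
  ("battery management", "Other"),
  ("sustainable battery", "Other"),
  ("recyclable battery", "Other"),
  ("phase field modeling", "Other"),
  ("dendrite suppression", "Other"),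
  ("electrode-electrolyte interface", "Other"),
  ("battery performance", "Other"),
  ("thermal management", "Other"),
  ("electrochemical kinetics", "Other")]

def get_data_type_alt (term : String) : String :=
  LABELS.getD term "Unknown"

-- ===== PRECONDITION & SPEC =====
def Spec_get_data_type (term : String) (out : String) : Prop := out = get_data_type_alt term
instance (term : String) (out : String) : Decidable (Spec_get_data_type term out) := by unfold Spec_get_data_type; infer_instance

-- ===== CLAIM =====
def Claim_equal_get_data_type : Prop := ∀ (term : String), Dom_get_data_type term → Spec_get_data_type term (get_data_type term)

-- ===== LEMMAS AND PROOFS =====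
-- every term occurring anywhere in the module's lists
def ALL : List String :=
  IDF_APPROX_TERMS ++ CAT_Materials ++ CAT_Methods ++ CAT_Phenomena ++ CAT_Properties ++ CAT_Other

set_option maxRecDepth 10000 in
theorem agree_on_vocab : ∀ t ∈ ALL, get_data_type t = get_data_type_alt t := by decide

set_option maxRecDepth 10000 in
theorem keys_sub : ∀ k ∈ LABELS.keys, k ∈ ALL := by decide

theorem agree_off_vocab (t : String) (h : t ∉ ALL) :
    get_data_type t = get_data_type_alt t := by
  simp only [ALL, List.mem_append, not_or] at h
  obtain ⟨⟨⟨⟨⟨h0, h1⟩, h2⟩, h3⟩, h4⟩, h5⟩ := h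
  have hitems : KEYWORD_CATEGORIES.items =
      [("Materials", CAT_Materials), ("Methods", CAT_Methods),
       ("Physical Phenomena", CAT_Phenomena), ("Properties", CAT_Properties),
       ("Other", CAT_Other)] := by rfl
  have hc : LABELS.contains t = false := by
    rw [PySem.Dict.contains_eq_decide_mem_keys]
    simp only [decide_eq_false_iff_not]
    intro hm
    have hall := keys_sub t hm
    simp only [ALL, List.mem_append] at hall
    rcases hall with ((((x|x)|x)|x)|x)|x
    exacts [h0 x, h1 x, h2 x, h3 x, h4 x, h5 x]
  have hget : LABELS.getD t "Unknown" = "Unknown" := PySem.Dict.getD_of_not_contains LABELS "Unknown" hc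
  simp [get_data_type, get_data_type_alt, hitems, List.foldl, h0, h1, h2, h3, h4, h5, hget]

-- ===== VERDICT =====
theorem get_data_type_spec : Claim_equal_get_data_type := by
  intro term _
  unfold Spec_get_data_type
  by_cases h : term ∈ ALL
  · exact agree_on_vocab term h
  · exact agree_off_vocab term h
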